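-- pv_equiv track=rewrite | github.com/julienr/advent_of_code | 2020/14/main.py | all_addr
-- ===== SOURCE A (Python) =====
-- def all_addr(addr):
--     queue = [addr]
--     results = []
--     while len(queue) > 0:
--         a = queue.pop()
--         i = a.index('X')
--         # generate two
--         a1 = "".join((a[:i], '0', a[i+1:]))
--         a2 = "".join((a[:i], '1', a[i+1:]))
--         if 'X' not in a1:
--             results.append(a1)
--             results.append(a2)
--         else:
--             queue.append(a1)
--             queue.append(a2)
--     return results
-- ===== SOURCE B (Python) =====
-- def all_addr(addr):
--     i = addr.index('X')
--     a1 = addr[:i] + '0' + addr[i + 1:]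
--     a2 = addr[:i] + '1' + addr[i + 1:]
--     if 'X' not in a1:
--         return [a1, a2]
--     return all_addr(a2) + all_addr(a1)
-- ===== Notes on version B (the rewrite author's own statement) =====
-- stated objective: simpler
-- what changed: A drives an explicit work-stack (queue of partially-expanded strings) with an accumulating results list; B is a direct recursion that expands the first 'X' and concatenates the recursive expansions (1-branch first, matching A's LIFO order), with no stack or accumulator.
import Mathlib
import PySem

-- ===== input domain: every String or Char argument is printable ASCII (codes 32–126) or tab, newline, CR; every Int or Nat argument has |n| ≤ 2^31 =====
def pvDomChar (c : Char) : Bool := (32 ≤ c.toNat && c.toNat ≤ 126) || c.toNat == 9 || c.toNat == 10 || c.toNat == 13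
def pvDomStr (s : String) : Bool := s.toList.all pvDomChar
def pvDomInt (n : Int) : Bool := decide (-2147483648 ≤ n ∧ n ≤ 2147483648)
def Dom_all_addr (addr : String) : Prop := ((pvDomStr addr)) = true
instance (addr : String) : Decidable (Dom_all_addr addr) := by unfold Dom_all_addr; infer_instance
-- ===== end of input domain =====

-- B replaces A's explicit work-stack loop by direct recursion on the two expansions
-- (recursing the '1' branch first so the output order matches A's LIFO order); objective: simpler.


-- ===== PORT A =====
-- two facts cited by the ports' decreasing_by: a 'some i' result of index? splits the list at i,
-- and replacing the character at i by a non-'X' character lowers the 'X'-count by one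
theorem pvIndexSplit (a : List Char) (i : Nat) (h : PySem.List.index? a 'X' = some i) :
    a.take i ++ 'X' :: a.drop (i + 1) = a ∧ 'X' ∉ a.take i := by
  obtain ⟨pre, suf, rfl, rfl, hnot⟩ := (PySem.List.index?_eq_some_iff _ _ _).1 h
  refine ⟨?_, by simpa using hnot⟩
  have t : (pre ++ 'X' :: suf).take pre.length = pre := by simp
  have d : (pre ++ 'X' :: suf).drop (pre.length + 1) = suf := by
    rw [show pre.length + 1 = (pre ++ ['X']).length by simp,
        show pre ++ 'X' :: suf = (pre ++ ['X']) ++ suf by simp]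
    simp
  rw [t, d]

theorem pvCountDrop (a : List Char) (i : Nat) (h : PySem.List.index? a 'X' = some i) (c : Char)
    (hc : c ≠ 'X') :
    ((a.take i ++ c :: a.drop (i + 1)).count 'X') + 1 = a.count 'X' := by
  obtain ⟨hsplit, hpre⟩ := pvIndexSplit a i h
  conv_rhs => rw [← hsplit]
  simp [List.count_append, hc]
  omega

-- A's work-stack loop; the HEAD of `queue` is the top of Python's list (pop()/append() act at the end)
def allAddrLoop (queue results : List (List Char)) : List (List Char) :=
  match queue with
  | [] => results
  | a :: rest =>
    match h : PySem.List.index? a 'X' with   -- i = a.index('X')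
    | none => results                         -- Python raises ValueError here; excluded by Pre_
    | some i =>
      -- a1 = "".join((a[:i], '0', a[i+1:])),  a2 = "".join((a[:i], '1', a[i+1:]))
      let a1 := a.take i ++ '0' :: a.drop (i + 1)
      let a2 := a.take i ++ '1' :: a.drop (i + 1)
      if PySem.Chars.isIn ['X'] a1 = false then   -- if 'X' not in a1
        allAddrLoop rest (results ++ [a1, a2])
      else
        allAddrLoop (a2 :: a1 :: rest) results
  termination_by (queue.map fun a => 3 ^ (a.count 'X')).sum
  decreasing_by
  · have h3 : 1 ≤ 3 ^ (a.count 'X') := Nat.one_le_pow _ _ (by omega)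
    simp only [List.map_cons, List.sum_cons]
    omega
  · have hk := pvCountDrop a i h '0' (by decide)
    have hk' := pvCountDrop a i h '1' (by decide)
    simp only [List.map_cons, List.sum_cons]
    have e0 : (a.take i ++ '0' :: a.drop (i + 1)).count 'X' = a.count 'X' - 1 := by omega
    have e1 : (a.take i ++ '1' :: a.drop (i + 1)).count 'X' = a.count 'X' - 1 := by omega
    have hpow : 3 ^ (a.count 'X' - 1) + 3 ^ (a.count 'X' - 1) < 3 ^ (a.count 'X') := by
      calc 3 ^ (a.count 'X' - 1) + 3 ^ (a.count 'X' - 1)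
          < 3 ^ (a.count 'X' - 1) * 3 := by
            have := Nat.one_le_pow (a.count 'X' - 1) 3 (by omega)
            omega
        _ = 3 ^ ((a.count 'X' - 1) + 1) := by rw [pow_succ]
        _ = 3 ^ (a.count 'X') := by congr 1; omega
    rw [e0, e1]
    omega

def all_addr (addr : String) : List String :=
  (allAddrLoop [addr.toList] []).map String.mk

-- ===== PORT B =====
def allAddrRec (addr : List Char) : List (List Char) :=
  match h : PySem.List.index? addr 'X' with   -- i = addr.index('X')
  | none => []                                 -- Python raises ValueError here; excluded by Pre_
  | some i =>
    let a1 := addr.take i ++ '0' :: addr.drop (i + 1)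
    let a2 := addr.take i ++ '1' :: addr.drop (i + 1)
    if PySem.Chars.isIn ['X'] a1 = false then [a1, a2]   -- if 'X' not in a1
    else allAddrRec a2 ++ allAddrRec a1
  termination_by addr.count 'X'
  decreasing_by
  · have := pvCountDrop addr i h '1' (by decide)
    omega
  · have := pvCountDrop addr i h '0' (by decide)
    omega

def all_addr_alt (addr : String) : List String :=
  (allAddrRec addr.toList).map String.mk

-- ===== PRECONDITION & SPEC =====
-- Pre_ excludes strings containing no 'X', on which str.index raises ValueError (both A and B raise there).
def Pre_all_addr (addr : String) : Prop := PySem.Str.isIn "X" addr = true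
instance (addr : String) : Decidable (Pre_all_addr addr) := by unfold Pre_all_addr; infer_instance
def pvWitness_all_addr : String := "X0"

def Spec_all_addr (addr : String) (out : List String) : Prop := out = all_addr_alt addr
instance (addr : String) (out : List String) : Decidable (Spec_all_addr addr out) := by unfold Spec_all_addr; infer_instance

-- ===== CLAIM (what is proved, stated in full; the proofs are below) =====
def Claim_equal_all_addr : Prop := ∀ (addr : String), Dom_all_addr addr → Pre_all_addr addr → Spec_all_addr addr (all_addr addr)

-- ===== LEMMAS AND PROOFS =====
-- evaluation lemmas for the two ports (unfold the `match h :` one step)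
theorem allAddrLoop_cons_some (a : List Char) (rest results : List (List Char)) (i : Nat)
    (h : PySem.List.index? a 'X' = some i) :
    allAddrLoop (a :: rest) results =
      if PySem.Chars.isIn ['X'] (a.take i ++ '0' :: a.drop (i + 1)) = false then
        allAddrLoop rest (results ++ [a.take i ++ '0' :: a.drop (i + 1), a.take i ++ '1' :: a.drop (i + 1)])
      else allAddrLoop ((a.take i ++ '1' :: a.drop (i + 1)) :: (a.take i ++ '0' :: a.drop (i + 1)) :: rest) results := by
  rw [allAddrLoop.eq_def]
  split
  · simp_all
  · rename_i a' rest' heq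
    obtain ⟨rfl, rfl⟩ := heq
    split
    · rename_i heq
      simp only [PySem.List.index?_eq_idxOf?] at h heq
      rw [h] at heq
      cases heq
    · rename_i i' heq
      simp only [PySem.List.index?_eq_idxOf?] at h heq
      rw [h] at heq
      cases heq
      rfl

theorem allAddrRec_some (a : List Char) (i : Nat)
    (h : PySem.List.index? a 'X' = some i) :
    allAddrRec a =
      if PySem.Chars.isIn ['X'] (a.take i ++ '0' :: a.drop (i + 1)) = false then
        [a.take i ++ '0' :: a.drop (i + 1), a.take i ++ '1' :: a.drop (i + 1)]
      else allAddrRec (a.take i ++ '1' :: a.drop (i + 1)) ++ allAddrRec (a.take i ++ '0' :: a.drop (i + 1)) := by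
  rw [allAddrRec.eq_def]
  split
  · rename_i heq
    simp only [PySem.List.index?_eq_idxOf?] at h heq
    rw [h] at heq
    cases heq
  · rename_i i' heq
    simp only [PySem.List.index?_eq_idxOf?] at h heq
    rw [h] at heq
    cases heq
    rfl

theorem pvIsIn_singleton (a : List Char) : PySem.Chars.isIn ['X'] a = true ↔ 'X' ∈ a := by
  rw [PySem.Chars.isIn_iff_infix]
  constructor
  · intro h; exact h.mem (by simp)
  · intro h
    obtain ⟨pre, suf, rfl⟩ := List.mem_iff_append.1 h
    exact ⟨pre, suf, by simp⟩

-- the loop computes, left to right over the stack, exactly what the recursion computes on each entry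
theorem pvLoop_eq (queue results : List (List Char)) (hinv : ∀ a ∈ queue, 'X' ∈ a) :
    allAddrLoop queue results = results ++ (queue.map allAddrRec).flatten := by
  induction queue, results using allAddrLoop.induct with
  | case1 results => simp [allAddrLoop]
  | case2 results a rest h =>
    exact absurd (hinv a (by simp)) ((PySem.List.index?_eq_none_iff _ _).1 h)
  | case3 results a rest i h a1 a2 hno ih =>
    rw [allAddrLoop_cons_some a rest results i h, if_pos hno,
        ih (fun b hb => hinv b (by simp [hb]))]
    rw [List.map_cons, List.flatten_cons, allAddrRec_some a i h, if_pos hno]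
    simp [a1, a2]
  | case4 results a rest i h a1 a2 hyes ih =>
    rw [allAddrLoop_cons_some a rest results i h, if_neg hyes]
    have hx1 : 'X' ∈ a.take i ++ '0' :: a.drop (i + 1) :=
      (pvIsIn_singleton _).1 (by revert hyes; cases hb : PySem.Chars.isIn ['X'] (a.take i ++ '0' :: a.drop (i + 1)) <;> simp)
    have hx2 : 'X' ∈ a.take i ++ '1' :: a.drop (i + 1) := by
      rcases List.mem_append.1 hx1 with h1 | h1
      · exact List.mem_append.2 (Or.inl h1)
      · rcases List.mem_cons.1 h1 with h2 | h2
        · exact absurd h2 (by decide)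
        · exact List.mem_append.2 (Or.inr (List.mem_cons.2 (Or.inr h2)))
    have hq : ∀ b ∈ (a.take i ++ '1' :: a.drop (i + 1)) :: (a.take i ++ '0' :: a.drop (i + 1)) :: rest, 'X' ∈ b := by
      intro b hb
      rcases List.mem_cons.1 hb with rfl | hb
      · exact hx2
      · rcases List.mem_cons.1 hb with rfl | hb
        · exact hx1
        · exact hinv b (List.mem_cons.2 (Or.inr hb))
    rw [ih hq]
    conv_rhs => rw [List.map_cons, List.flatten_cons, allAddrRec_some a i h, if_neg hyes]
    simp [a1, a2]

-- ===== VERDICT (by name: the statement is the Claim_ definition above) =====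
theorem all_addr_spec : Claim_equal_all_addr := by
  intro addr _ hpre
  unfold Spec_all_addr all_addr all_addr_alt
  have hx : 'X' ∈ addr.toList := by
    have := (PySem.Str.isIn_iff_infix _ _).1 hpre
    exact this.mem (by simp)
  rw [pvLoop_eq [addr.toList] [] (by intro a ha; rw [List.mem_singleton] at ha; subst ha; exact hx)]
  simp
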